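-- pv_equiv track=rewrite | github.com/laagom/Algorithm | 프로그래머스/unrated/181918. 배열 만들기 4/배열 만들기 4.py | solution
-- ===== SOURCE A (Python) =====
-- def solution(arr):
--     stk = []
--     i = 0
--     while i < len(arr):
--         if not len(stk):
--             stk.append(arr[i])
--             i += 1
--         elif len(stk) > 0:
--             if stk[-1] < arr[i]:
--                 stk.append(arr[i])
--                 i += 1
--             elif stk[-1] >= arr[i]:
--                 del stk[-1]
--
--     return stk
-- ===== SOURCE B (Python) =====
-- def solution(arr):
--     res = []
--     m = None
--     for x in reversed(arr):
--         if m is None or x < m: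
--             res.append(x)
--             m = x
--     res.reverse()
--     return res
-- ===== Notes on version B (the rewrite author's own statement) =====
-- stated objective: faster
-- what changed: Replaces the stack with push/pop-until-smaller by a single right-to-left scan keeping strict suffix minima (each element examined once, no pops).
import Mathlib
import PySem

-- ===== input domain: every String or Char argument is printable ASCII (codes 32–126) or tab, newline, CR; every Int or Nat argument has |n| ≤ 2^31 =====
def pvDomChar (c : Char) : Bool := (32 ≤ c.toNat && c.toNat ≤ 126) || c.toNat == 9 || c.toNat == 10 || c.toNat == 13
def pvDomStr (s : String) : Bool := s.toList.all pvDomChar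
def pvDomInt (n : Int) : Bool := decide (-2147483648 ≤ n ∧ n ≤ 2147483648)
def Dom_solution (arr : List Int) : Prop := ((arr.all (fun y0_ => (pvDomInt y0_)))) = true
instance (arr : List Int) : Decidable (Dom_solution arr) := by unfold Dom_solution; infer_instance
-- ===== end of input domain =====

-- B replaces A's stack with pop-until-smaller by a single right-to-left scan keeping strict suffix minima.

-- ===== PORT A =====
-- A's while-loop over index i with a stack; the stack is held TOP-FIRST here
-- (python's stk[-1] is the head), so the final result is returned reversed.
def solutionLoopA (stk rest : List Int) : List Int :=
  match stk, rest with
  | stk, [] => stk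
  | [], x :: rest' => solutionLoopA [x] rest'          -- "if not len(stk): append, i += 1"
  | t :: s, x :: rest' =>
      if t < x then solutionLoopA (x :: t :: s) rest'  -- "stk[-1] < arr[i]: append, i += 1"
      else solutionLoopA s (x :: rest')                -- "stk[-1] >= arr[i]: del stk[-1]"
termination_by (rest.length, stk.length)

def solution (arr : List Int) : List Int := (solutionLoopA [] arr).reverse

-- ===== PORT B =====
-- single pass over reversed(arr), keeping x when it is a new strict minimum;
-- res is appended to and reversed at the end, as in Source B
def solution_alt (arr : List Int) : List Int :=
  let st := arr.reverse.foldl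
    (fun (st : Option Int × List Int) x =>
      match st.1 with
      | none => (some x, st.2 ++ [x])
      | some m => if x < m then (some x, st.2 ++ [x]) else st)
    (none, [])
  st.2.reverse

-- ===== PRECONDITION & SPEC =====
def Spec_solution (arr : List Int) (out : List Int) : Prop := out = solution_alt arr
instance (arr : List Int) (out : List Int) : Decidable (Spec_solution arr out) := by unfold Spec_solution; infer_instance

-- ===== CLAIM (what is proved, stated in full; the proofs are below) =====
def Claim_equal_solution : Prop := ∀ (arr : List Int), Dom_solution arr → Spec_solution arr (solution arr)

-- ===== LEMMAS AND PROOFS =====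

-- the common recursive characterisation: keep x iff x is below the suffix minimum
def sufKeep : List Int → List Int
  | [] => []
  | x :: rest =>
      match sufKeep rest with
      | [] => [x]
      | h :: t => if x < h then x :: h :: t else h :: t

-- one A-step: pop while top ≥ x, then push x
def stepA (stk : List Int) (x : Int) : List Int :=
  x :: stk.dropWhile (fun t => decide (x ≤ t))

theorem dropWhile_dropWhile_of_le (h x : Int) (hx : h ≤ x) (l : List Int) :
    (l.dropWhile (fun t => decide (x ≤ t))).dropWhile (fun t => decide (h ≤ t))
      = l.dropWhile (fun t => decide (h ≤ t)) := by
  induction l with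
  | nil => simp
  | cons a l ih =>
      by_cases hax : x ≤ a
      · have hha : h ≤ a := le_trans hx hax
        simp [List.dropWhile, hax, hha, ih]
      · simp [List.dropWhile, hax]

theorem solutionLoopA_step (stk : List Int) (x : Int) (rest : List Int) :
    solutionLoopA stk (x :: rest) = solutionLoopA (stepA stk x) rest := by
  induction stk with
  | nil => simp [solutionLoopA, stepA, List.dropWhile]
  | cons t s ih =>
      by_cases htx : t < x
      · have : ¬ (x ≤ t) := not_le.mpr htx
        simp [solutionLoopA, htx, stepA, List.dropWhile, this]
      · have hxt : x ≤ t := not_lt.mp htx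
        rw [show solutionLoopA (t :: s) (x :: rest) = solutionLoopA s (x :: rest) by
              simp [solutionLoopA, htx]]
        rw [ih]
        simp [stepA, List.dropWhile, hxt]

theorem solutionLoopA_eq_foldl (l : List Int) : ∀ stk,
    solutionLoopA stk l = l.foldl stepA stk := by
  induction l with
  | nil => intro stk; simp [solutionLoopA]
  | cons x rest ih =>
      intro stk
      rw [solutionLoopA_step, List.foldl_cons, ih]

theorem foldl_stepA_eq (l : List Int) : ∀ stk,
    l.foldl stepA stk =
      (sufKeep l).reverse ++
        (match sufKeep l with
         | [] => stk
         | h :: _ => stk.dropWhile (fun t => decide (h ≤ t))) := by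
  induction l with
  | nil => intro stk; simp [sufKeep]
  | cons x rest ih =>
      intro stk
      rw [List.foldl_cons, ih]
      cases hrest : sufKeep rest with
      | nil =>
          -- as in sufKeep_head_min: sufKeep rest = [] forces rest = []
          cases rest with
          | nil => simp [sufKeep, stepA]
          | cons b r =>
              exfalso
              simp [sufKeep] at hrest
              cases hh : sufKeep r with
              | nil => simp [hh] at hrest
              | cons u v => by_cases hbu : b < u <;> simp [hh, hbu] at hrest
      | cons h t =>
          by_cases hxh : x < h
          · have hnx : ¬ (h ≤ x) := not_le.mpr hxh
            simp only [sufKeep, hrest, if_pos hxh]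
            simp [stepA, hnx]
          · have hhx : h ≤ x := not_lt.mp hxh
            simp only [sufKeep, hrest, if_neg hxh]
            simp [stepA, hhx,
                  dropWhile_dropWhile_of_le h x hhx]

-- B's fold over the reversed list, as a foldr over the original list
theorem solution_alt_foldr (arr : List Int) :
    arr.reverse.foldl
      (fun (st : Option Int × List Int) x =>
        match st.1 with
        | none => (some x, st.2 ++ [x])
        | some m => if x < m then (some x, st.2 ++ [x]) else st)
      (none, [])
    = ((sufKeep arr).head?, (sufKeep arr).reverse) := by
  rw [List.foldl_reverse]
  induction arr with
  | nil => simp [sufKeep]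
  | cons x rest ih =>
      rw [List.foldr_cons, ih]
      cases hrest : sufKeep rest with
      | nil => simp [sufKeep, hrest]
      | cons h t =>
          by_cases hxh : x < h
          · simp [sufKeep, hrest, hxh]
          · simp [sufKeep, hrest, hxh]

-- ===== VERDICT (by name: the statement is the Claim_ definition above) =====
theorem solution_spec : Claim_equal_solution := by
  intro arr _
  show solution arr = solution_alt arr
  unfold solution solution_alt
  rw [solutionLoopA_eq_foldl, foldl_stepA_eq, solution_alt_foldr]
  cases h : sufKeep arr <;> simp
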